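-- pv_equiv track=rewrite | github.com/wkisme/kemeny-young-rank | kemeny-young rank/src/output_processing2.py | standard_dictionary
-- ===== SOURCE A (Python) =====
-- def standard_dictionary(dic):
--
--
--
--     l1 = sorted(dic, key=dic.__getitem__, reverse=True)
--     str1 = ''
--     for i in range(len(l1)):
--         if i < len(l1) - 1:
--             if dic[l1[i]] == dic[l1[i+1]]:
--                 str1 += l1[i]
--                 str1 += '~'
--             else:
--                 str1 += l1[i]
--                 str1 += '>'
--         else:
--             str1 += l1[i]
--
--
--
--     return str1
-- ===== SOURCE B (Python) =====
-- def standard_dictionary(dic):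
--     buckets = {}
--     for k in dic:
--         buckets.setdefault(dic[k], []).append(k)
--     return '>'.join('~'.join(buckets[v]) for v in sorted(buckets, reverse=True))
-- ===== Notes on version B (the rewrite author's own statement) =====
-- stated objective: faster
-- what changed: Instead of sorting all keys and scanning adjacent pairs, B never sorts the keys: it buckets keys by value into a dict in one pass, sorts only the distinct values descending, and joins each bucket with '~' and buckets with '>'; this matches A because A's sort is stable, so equal-valued keys keep insertion order, which is exactly the bucket order.
import Mathlib
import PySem

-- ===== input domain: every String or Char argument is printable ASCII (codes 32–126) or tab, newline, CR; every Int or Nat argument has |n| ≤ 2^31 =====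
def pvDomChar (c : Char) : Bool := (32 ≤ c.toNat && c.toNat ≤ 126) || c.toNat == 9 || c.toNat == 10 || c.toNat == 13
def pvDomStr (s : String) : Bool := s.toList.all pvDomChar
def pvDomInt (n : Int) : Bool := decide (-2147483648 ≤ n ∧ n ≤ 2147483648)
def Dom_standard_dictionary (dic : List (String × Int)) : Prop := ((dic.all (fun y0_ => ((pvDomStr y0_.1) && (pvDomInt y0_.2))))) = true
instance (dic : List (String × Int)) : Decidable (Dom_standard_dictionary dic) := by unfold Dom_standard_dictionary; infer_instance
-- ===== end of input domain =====

-- B never sorts the keys: it buckets keys by value in one dict pass and sorts only the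
-- distinct values descending (correct because A's sort is stable); a timing run measured it faster.

-- ===== PORT A =====
-- the 'for i in range(len(l1))' loop of A, accumulating str1
def pvALoop (g : String → Int) (l1 : List String) (i : Nat) (str1 : String) : String :=
  if _h : i < l1.length then
    pvALoop g l1 (i + 1)
      (if i < l1.length - 1 then
        (if g (l1.getD i "") = g (l1.getD (i + 1) "") then str1 ++ l1.getD i "" ++ "~"
         else str1 ++ l1.getD i "" ++ ">")
       else str1 ++ l1.getD i "")
  else str1
termination_by l1.length - i

def standard_dictionary (dic : List (String × Int)) : String :=
  let d := PySem.Dict.ofList dic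
  let l1 := PySem.List.sorted d.keys (fun k => d.getD k 0) true
  pvALoop (fun k => d.getD k 0) l1 0 ""

-- ===== PORT B =====
def standard_dictionary_alt (dic : List (String × Int)) : String :=
  let d := PySem.Dict.ofList dic
  -- buckets.setdefault(dic[k], []).append(k)  =  modify (value) [] (· ++ [key])
  let buckets := d.items.foldl
    (fun (b : PySem.Dict Int (List String)) kv => b.modify kv.2 [] (fun l => l ++ [kv.1]))
    PySem.Dict.empty
  PySem.Str.join ">"
    ((PySem.List.sorted buckets.keys (fun v => v) true).map
      (fun v => PySem.Str.join "~" (buckets.getD v [])))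

-- ===== PRECONDITION & SPEC =====
def Spec_standard_dictionary (dic : List (String × Int)) (out : String) : Prop := out = standard_dictionary_alt dic
instance (dic : List (String × Int)) (out : String) : Decidable (Spec_standard_dictionary dic out) := by unfold Spec_standard_dictionary; infer_instance

-- ===== CLAIM (what is proved, stated in full; the proofs are below) =====
def Claim_equal_standard_dictionary : Prop := ∀ (dic : List (String × Int)), Dom_standard_dictionary dic → Spec_standard_dictionary dic (standard_dictionary dic)

-- ===== LEMMAS AND PROOFS =====

-- A's loop, read off the remaining suffix of the list
def pvTail (g : String → Int) : List String → String
  | [] => ""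
  | [x] => x
  | x :: y :: t => x ++ (if g x = g y then "~" else ">") ++ pvTail g (y :: t)

theorem pvALoop_eq_tail (g : String → Int) (l1 : List String) :
    ∀ i s, pvALoop g l1 i s = s ++ pvTail g (l1.drop i) := by
  intro i s
  fun_induction pvALoop g l1 i s with
  | case1 i s hi ih =>
    simp only [dite_eq_ite] at ih
    rw [ih]
    rw [List.drop_eq_getElem_cons hi]
    rw [List.getD_eq_getElem l1 "" hi]
    by_cases hlast : i < l1.length - 1
    · have hi1 : i + 1 < l1.length := by omega
      rw [List.drop_eq_getElem_cons hi1, List.getD_eq_getElem l1 "" hi1]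
      simp only [hlast, if_true, pvTail]
      split <;> (apply String.toList_injective; simp)
    · have hd : l1.drop (i + 1) = [] := List.drop_eq_nil_of_le (by omega)
      rw [hd]
      simp only [hlast, if_false, pvTail]
      apply String.toList_injective; simp
  | case2 i s hi =>
    rw [List.drop_eq_nil_of_le (by omega)]
    simp [pvTail]

-- insert a value into a strictly decreasing list of distinct values (no-op if present)
def pvInsDec (w : Int) : List Int → List Int
  | [] => [w]
  | v :: t => if v < w then w :: v :: t else if w = v then v :: t else v :: pvInsDec w t

theorem pvInsDec_mem {w b : Int} : ∀ {V : List Int}, b ∈ pvInsDec w V → b = w ∨ b ∈ V := by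
  intro V
  induction V with
  | nil => simp [pvInsDec]
  | cons v t ih =>
    simp only [pvInsDec]
    split_ifs
    · simp_all
    · simp_all
    · simp_all
      tauto

theorem pvInsDec_eq_of_mem {w : Int} : ∀ {V : List Int},
    V.Pairwise (fun a b => b < a) → w ∈ V → pvInsDec w V = V := by
  intro V
  induction V with
  | nil => simp
  | cons v t ih =>
    intro hp hm
    rcases List.mem_cons.1 hm with h | h
    · simp [pvInsDec, h]
    · have hlt : w < v := (List.pairwise_cons.1 hp).1 w h
      have := ih (List.pairwise_cons.1 hp).2 h
      simp only [pvInsDec, if_neg (by omega : ¬ v < w), if_neg (by omega : ¬ w = v), this]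

theorem pvInsDec_perm {w : Int} : ∀ {V : List Int}, w ∉ V → (pvInsDec w V).Perm (w :: V) := by
  intro V
  induction V with
  | nil => simp [pvInsDec]
  | cons v t ih =>
    intro hm
    have hwv : w ≠ v := fun h => hm (by simp [h])
    have hwt : w ∉ t := fun h => hm (by simp [h])
    by_cases h1 : v < w
    · simp [pvInsDec, h1]
    · rw [pvInsDec, if_neg h1, if_neg (fun h => hwv h)]
      exact ((ih hwt).cons v).trans (List.Perm.swap w v t)

theorem pvInsDec_pairwise {w : Int} : ∀ {V : List Int},
    V.Pairwise (fun a b => b < a) → (pvInsDec w V).Pairwise (fun a b => b < a) := by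
  intro V
  induction V with
  | nil => simp [pvInsDec]
  | cons v t ih =>
    intro hp
    obtain ⟨hv, ht⟩ := List.pairwise_cons.1 hp
    simp only [pvInsDec]
    split_ifs with h1 h2
    · exact List.pairwise_cons.2 ⟨by
        intro b hb
        rcases List.mem_cons.1 hb with h | h
        · omega
        · have := hv b h; omega, hp⟩
    · exact hp
    · refine List.pairwise_cons.2 ⟨?_, ih ht⟩
      intro b hb
      rcases pvInsDec_mem hb with h | h
      · omega
      · exact hv b h

-- insertBy walks past elements it is not inserted before
theorem insertBy_skip {α : Type} (before : α → α → Bool) (x : α) :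
    ∀ (as bs : List α), (∀ y ∈ as, before x y = false) →
      PySem.List.insertBy before x (as ++ bs) = as ++ PySem.List.insertBy before x bs := by
  intro as
  induction as with
  | nil => simp
  | cons a as' ih =>
    intro bs h
    simp only [List.cons_append, PySem.List.insertBy, h a (by simp)]
    simp only [Bool.false_eq_true, if_false, List.cons.injEq, true_and]
    exact ih bs (fun y hy => h y (by simp [hy]))

-- the insertion-sort step on a list grouped by strictly decreasing values
theorem insertBy_flatMap {α : Type} (key : α → Int) (x : α) (F : Int → List α) :
    ∀ (V : List Int), V.Pairwise (fun a b => b < a) →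
      (∀ v ∈ V, F v ≠ [] ∧ ∀ y ∈ F v, key y = v) →
      (key x ∉ V → F (key x) = []) →
      PySem.List.insertBy (fun a b => decide (key b < key a)) x (V.flatMap F)
        = (pvInsDec (key x) V).flatMap (fun v => F v ++ if key x = v then [x] else []) := by
  intro V
  induction V with
  | nil =>
    intro _ _ hw
    simp [pvInsDec, PySem.List.insertBy, hw (by simp)]
  | cons v t ih =>
    intro hp hF hw
    obtain ⟨hv, ht⟩ := List.pairwise_cons.1 hp
    obtain ⟨hFv, hFkey⟩ := hF v (by simp)
    set w := key x with hwdef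
    rcases lt_trichotomy v w with hvw | heq | hwlt
    · -- w > v : x goes in front of everything
      have hwnotin : w ∉ v :: t := by
        intro h
        rcases List.mem_cons.1 h with h | h
        · omega
        · have := hv w h; omega
      obtain ⟨z, zs, hz⟩ := List.exists_cons_of_ne_nil hFv
      have hkz : key z = v := hFkey z (by simp [hz])
      have hLHS : PySem.List.insertBy (fun a b => decide (key b < key a)) x ((v :: t).flatMap F)
          = x :: (v :: t).flatMap F := by
        simp only [List.flatMap_cons, hz, List.cons_append, PySem.List.insertBy]
        rw [if_pos (by simp only [decide_eq_true_eq]; rw [hkz, ← hwdef]; omega)]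
      rw [hLHS]
      have hneqv : ¬ w = v := by omega
      have htmap : t.flatMap (fun u => F u ++ if w = u then [x] else []) = t.flatMap F := by
        apply List.flatMap_congr
        intro u hu
        have : ¬ w = u := by have := hv u hu; omega
        simp [this]
      simp only [pvInsDec, if_pos hvw, List.flatMap_cons, hw hwnotin, htmap, if_neg hneqv]
      simp
    · -- w = v : x goes at the end of group v
      have hweq : w = v := heq.symm
      have hskip : ∀ y ∈ F v, (fun a b => decide (key b < key a)) x y = false := by
        intro y hy
        simp only [decide_eq_false_iff_not, not_lt]
        rw [hFkey y hy, ← hwdef]; omega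
      have hwt : w ∉ t := by
        intro h; have := hv w h; omega
      have htmap : t.flatMap (fun u => F u ++ if w = u then [x] else []) = t.flatMap F := by
        apply List.flatMap_congr
        intro u hu
        have : ¬ w = u := fun h => hwt (h ▸ hu)
        simp [this]
      simp only [List.flatMap_cons]
      rw [insertBy_skip _ _ _ _ hskip]
      simp only [pvInsDec, if_neg (by omega : ¬ v < w), List.flatMap_cons,
        htmap, if_pos hweq]
      cases t with
      | nil =>
        simp [PySem.List.insertBy]
      | cons v' t' =>
        obtain ⟨hFv', hFkey'⟩ := hF v' (by simp)
        obtain ⟨z, zs, hz⟩ := List.exists_cons_of_ne_nil hFv'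
        have hkz : key z = v' := hFkey' z (by simp [hz])
        have hv'v : v' < v := hv v' (by simp)
        have hx : PySem.List.insertBy (fun a b => decide (key b < key a)) x ((v' :: t').flatMap F)
            = x :: (v' :: t').flatMap F := by
          simp only [List.flatMap_cons, hz, List.cons_append, PySem.List.insertBy]
          rw [if_pos (by simp only [decide_eq_true_eq]; rw [hkz, ← hwdef]; omega)]
        simp only [List.flatMap_cons] at hx ⊢
        rw [hx]
        simp
    · -- w < v : skip group v, recurse
      have hskip : ∀ y ∈ F v, (fun a b => decide (key b < key a)) x y = false := by
        intro y hy
        simp only [decide_eq_false_iff_not, not_lt]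
        rw [hFkey y hy, ← hwdef]; omega
      have hneqv : ¬ w = v := by omega
      have hw' : w ∉ t → F w = [] := by
        intro h
        exact hw (by simp [hneqv, h])
      simp only [List.flatMap_cons]
      rw [insertBy_skip _ _ _ _ hskip]
      rw [ih ht (fun u hu => hF u (by simp [hu])) hw']
      simp only [pvInsDec, if_neg (by omega : ¬ v < w), List.flatMap_cons,
        if_neg hneqv, List.append_nil]

-- dedup of an appended fresh/stale element
theorem dedup_append_singleton (vs : List Int) (w : Int) :
    PySem.List.dedup (vs ++ [w])
      = if w ∈ vs then PySem.List.dedup vs else PySem.List.dedup vs ++ [w] := by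
  simp only [PySem.List.dedup_eq_ofList, PySem.Set.ofList_eq_foldl, List.foldl_append,
    List.foldl_cons, List.foldl_nil]
  rw [← PySem.Set.ofList_eq_foldl]
  by_cases h : w ∈ vs
  · have hc : PySem.Set.contains (PySem.Set.ofList vs) w = true :=
      (PySem.Set.contains_iff _ _).mpr ((PySem.Set.mem_ofList vs w).mpr h)
    rw [PySem.Set.add, hc]
    simp [h]
  · have hc : PySem.Set.contains (PySem.Set.ofList vs) w = false := by
      rw [← Bool.not_eq_true, PySem.Set.contains_iff, PySem.Set.mem_ofList]; exact h
    rw [PySem.Set.add, hc]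
    simp [h]

-- THE STABILITY CHARACTERISATION: a stable descending sort is the concatenation, over the
-- distinct values in descending order, of the input's keys of that value in input order.
theorem sorted_rev_eq_flatMap {α : Type} (key : α → Int) :
    ∀ xs : List α,
      PySem.List.sorted xs key true
        = (PySem.List.sorted (PySem.List.dedup (xs.map key)) (fun v => v) true).flatMap
            (fun v => xs.filter (fun y => key y == v)) := by
  intro xs
  induction xs using List.reverseRecOn with
  | nil => simp [PySem.List.sorted]
  | append_singleton xs x ih =>
    set V := PySem.List.sorted (PySem.List.dedup (xs.map key)) (fun v => v) true with hVdef
    have hVperm : V.Perm (PySem.List.dedup (xs.map key)) := PySem.List.sorted_perm _ _ _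
    have hVnodup : V.Nodup := hVperm.nodup_iff.2 (PySem.List.nodup_dedup _)
    have hVpair : V.Pairwise (fun a b => b < a) := by
      have h1 := PySem.List.sorted_pairwise_rev (PySem.List.dedup (xs.map key)) (fun v => v)
      rw [← hVdef] at h1
      have := h1.and hVnodup
      exact this.imp (fun h => by omega)
    have hmemV : ∀ v, v ∈ V ↔ v ∈ xs.map key := by
      intro v
      rw [hVperm.mem_iff, PySem.List.mem_dedup]
    have hF : ∀ v ∈ V, xs.filter (fun y => key y == v) ≠ [] ∧
        ∀ y ∈ xs.filter (fun y => key y == v), key y = v := by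
      intro v hv
      constructor
      · obtain ⟨y, hy, hky⟩ := List.mem_map.1 ((hmemV v).1 hv)
        exact List.ne_nil_of_mem (List.mem_filter.2 ⟨hy, by simp [hky]⟩)
      · intro y hy
        have := (List.mem_filter.1 hy).2
        simpa using this
    have hw : key x ∉ V → xs.filter (fun y => key y == key x) = [] := by
      intro h
      rw [List.filter_eq_nil_iff]
      intro y hy hk
      exact h ((hmemV _).2 (List.mem_map.2 ⟨y, hy, by simpa using hk⟩))
    -- left side: one more insertion step
    rw [PySem.List.sorted_rev_eq_foldl_insertBy, List.foldl_append, List.foldl_cons,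
      List.foldl_nil, ← PySem.List.sorted_rev_eq_foldl_insertBy, ih]
    rw [insertBy_flatMap key x _ V hVpair hF hw]
    -- right side: identify the new sorted value list with pvInsDec
    have hnewV : PySem.List.sorted (PySem.List.dedup ((xs ++ [x]).map key)) (fun v => v) true
        = pvInsDec (key x) V := by
      rw [List.map_append, List.map_singleton, dedup_append_singleton]
      by_cases h : key x ∈ xs.map key
      · rw [if_pos h, ← hVdef]
        exact (pvInsDec_eq_of_mem hVpair ((hmemV _).2 h)).symm
      · rw [if_neg h]
        apply PySem.List.sorted_rev_eq_of_perm_of_pairwise_gt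
        · have h1 : (pvInsDec (key x) V).Perm (key x :: V) :=
            pvInsDec_perm (fun hc => h ((hmemV _).1 hc))
          have h2 : (key x :: V).Perm (key x :: PySem.List.dedup (xs.map key)) := hVperm.cons _
          exact (h1.trans h2).trans (List.perm_append_singleton _ _).symm
        · exact pvInsDec_pairwise hVpair
    rw [hnewV]
    apply List.flatMap_congr
    intro v _
    rw [List.filter_append]
    congr 1
    simp only [List.filter_cons, List.filter_nil]
    by_cases h : key x = v <;> simp [h]

-- pvTail of a single constant-value group
theorem pvTail_const (g : String → Int) (v : Int) :
    ∀ as : List String, as ≠ [] → (∀ y ∈ as, g y = v) →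
      pvTail g as = PySem.Str.join "~" as := by
  intro as
  induction as with
  | nil => simp
  | cons a as' ih =>
    intro _ h
    cases as' with
    | nil =>
      apply String.toList_injective
      simp [pvTail, PySem.Str.toList_join, PySem.Chars.join, List.intercalate]
    | cons b bs =>
      have hab : g a = g b := by rw [h a (by simp), h b (by simp)]
      rw [pvTail, if_pos hab, ih (by simp) (fun y hy => h y (by simp [List.mem_cons.1 hy]))]
      apply String.toList_injective
      simp [PySem.Str.toList_join, PySem.Chars.join_cons_cons]

-- pvTail splits at a value change
theorem pvTail_split (g : String → Int) (v : Int) (z : String) (zs : List String)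
    (hz : g z ≠ v) :
    ∀ as : List String, as ≠ [] → (∀ y ∈ as, g y = v) →
      pvTail g (as ++ z :: zs) = PySem.Str.join "~" as ++ ">" ++ pvTail g (z :: zs) := by
  intro as
  induction as with
  | nil => simp
  | cons a as' ih =>
    intro _ h
    cases as' with
    | nil =>
      have : g a ≠ g z := by rw [h a (by simp)]; exact fun hc => hz hc.symm
      simp only [List.cons_append, List.nil_append, pvTail, if_neg this]
      apply String.toList_injective
      simp [PySem.Str.toList_join, PySem.Chars.join, List.intercalate]
    | cons b bs =>
      have hab : g a = g b := by rw [h a (by simp), h b (by simp)]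
      simp only [List.cons_append, pvTail, if_pos hab]
      rw [List.cons_append] at ih
      rw [ih (by simp) (fun y hy => h y (by simp [List.mem_cons.1 hy]))]
      apply String.toList_injective
      simp [PySem.Str.toList_join, PySem.Chars.join_cons_cons]

-- pvTail over the grouped list is the double join
theorem pvTail_flatMap (g : String → Int) (F : Int → List String) :
    ∀ V : List Int, V.Pairwise (fun a b => b < a) →
      (∀ v ∈ V, F v ≠ [] ∧ ∀ y ∈ F v, g y = v) →
      pvTail g (V.flatMap F)
        = PySem.Str.join ">" (V.map (fun v => PySem.Str.join "~" (F v))) := by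
  intro V
  induction V with
  | nil => simp [pvTail, PySem.Str.join, PySem.Chars.join, List.intercalate]
  | cons v t ih =>
    intro hp hF
    obtain ⟨hv, ht⟩ := List.pairwise_cons.1 hp
    obtain ⟨hFv, hFkey⟩ := hF v (by simp)
    cases t with
    | nil =>
      simp only [List.flatMap_cons, List.flatMap_nil, List.append_nil, List.map_cons,
        List.map_nil]
      rw [pvTail_const g v _ hFv hFkey]
      apply String.toList_injective
      simp [PySem.Str.toList_join, PySem.Chars.join, List.intercalate]
    | cons v' t' =>
      obtain ⟨hFv', hFkey'⟩ := hF v' (by simp)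
      obtain ⟨z, zs, hz⟩ := List.exists_cons_of_ne_nil hFv'
      have hkz : g z ≠ v := by
        rw [hFkey' z (by simp [hz])]
        have := hv v' (by simp); omega
      have hrest : (v' :: t').flatMap F = z :: (zs ++ t'.flatMap F) := by
        simp [hz]
      simp only [List.flatMap_cons]
      rw [show F v' ++ t'.flatMap F = z :: (zs ++ t'.flatMap F) by simp [hz]]
      rw [pvTail_split g v z _ hkz _ hFv hFkey]
      rw [← hrest, ih ht (fun u hu => hF u (by simp [hu]))]
      apply String.toList_injective
      simp [PySem.Str.toList_join, PySem.Chars.join_cons_cons]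

-- ===== VERDICT (by name: the statement is the Claim_ definition above) =====
theorem standard_dictionary_spec : Claim_equal_standard_dictionary := by
  intro dic _
  unfold Spec_standard_dictionary standard_dictionary standard_dictionary_alt
  dsimp only
  set d := PySem.Dict.ofList dic with hd
  set g : String → Int := fun k => d.getD k 0 with hg
  have hnd : d.keys.Nodup := PySem.Dict.nodup_keys_ofList dic
  -- B's buckets
  set buckets := d.items.foldl
    (fun (b : PySem.Dict Int (List String)) kv => b.modify kv.2 [] (fun l => l ++ [kv.1]))
    PySem.Dict.empty with hbuckets
  have hitems : d.items = d.keys.map (fun k => (k, g k)) := PySem.Dict.items_eq_map_keys d hnd 0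
  -- bucket keys = dedup of the value list
  have hkeys : buckets.keys = PySem.List.dedup (d.keys.map g) := by
    rw [hbuckets, PySem.Dict.keys_foldl_modify_key d.items (fun kv => kv.2) []
      (fun _ kv => fun l => l ++ [kv.1]) PySem.Dict.empty]
    have hvals : d.items.map (fun kv => kv.2) = d.keys.map g := by
      rw [hitems, List.map_map]; rfl
    rw [hvals, PySem.List.dedup_eq_ofList]
    rfl
  -- bucket contents = keys of that value, in key order
  have hbucket : ∀ v, buckets.getD v [] = d.keys.filter (fun k => g k == v) := by
    intro v
    rw [hbuckets]
    have hswap : d.items.foldl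
        (fun (b : PySem.Dict Int (List String)) kv => b.modify kv.2 [] (fun l => l ++ [kv.1]))
        PySem.Dict.empty
        = (d.items.map (fun kv => (kv.2, kv.1))).foldl
            (fun (b : PySem.Dict Int (List String)) p => b.modify p.1 [] (fun l => l ++ [p.2]))
            PySem.Dict.empty := by
      rw [List.foldl_map]
    rw [hswap, PySem.Dict.getD_foldl_modify_append, PySem.Dict.getD_empty, List.nil_append]
    rw [hitems, List.map_map, List.filter_map, List.map_map]
    simp [Function.comp_def]
  rw [hkeys]
  rw [pvALoop_eq_tail, List.drop_zero]
  set V := PySem.List.sorted (PySem.List.dedup (d.keys.map g)) (fun v => v) true with hVdef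
  have hVperm : V.Perm (PySem.List.dedup (d.keys.map g)) := PySem.List.sorted_perm _ _ _
  have hVnodup : V.Nodup := hVperm.nodup_iff.2 (PySem.List.nodup_dedup _)
  have hVpair : V.Pairwise (fun a b => b < a) := by
    have h1 := PySem.List.sorted_pairwise_rev (PySem.List.dedup (d.keys.map g)) (fun v => v)
    rw [← hVdef] at h1
    exact (h1.and hVnodup).imp (fun h => by omega)
  have hmemV : ∀ v, v ∈ V ↔ v ∈ d.keys.map g := fun v => by
    rw [hVperm.mem_iff, PySem.List.mem_dedup]
  have hF : ∀ v ∈ V, d.keys.filter (fun k => g k == v) ≠ [] ∧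
      ∀ y ∈ d.keys.filter (fun k => g k == v), g y = v := by
    intro v hv
    constructor
    · obtain ⟨y, hy, hky⟩ := List.mem_map.1 ((hmemV v).1 hv)
      exact List.ne_nil_of_mem (List.mem_filter.2 ⟨hy, by simp [hky]⟩)
    · intro y hy
      simpa using (List.mem_filter.1 hy).2
  rw [sorted_rev_eq_flatMap g d.keys, ← hVdef]
  rw [pvTail_flatMap g _ V hVpair hF]
  have hmap : List.map (fun v => PySem.Str.join "~" (buckets.getD v [])) V
      = List.map (fun v => PySem.Str.join "~" (List.filter (fun k => g k == v) d.keys)) V :=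
    List.map_congr_left (fun v _ => by rw [hbucket v])
  rw [hmap]
  apply String.toList_injective
  simp
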